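-- pv_equiv track=rewrite | github.com/mzeng7/euler-solutions | p033.py | digit_diff
-- ===== SOURCE A (Python) =====
-- def digit_diff(a, b):
--     # returns the number of digits that different between two numbers
--     a_lst, b_lst = list(str(a)), list(str(b))
--     count = 0
--     for i in a_lst:
--         if i in b_lst and a % 10 and b % 10:
--             count += 1
--             b_lst.remove(i)
--     return count
-- ===== SOURCE B (Python) =====
-- def digit_diff(a, b):
--     # Hoist the loop-invariant gate; then the count-and-remove loop is
--     # exactly the multiset intersection of the character multisets.
--     if a % 10 == 0 or b % 10 == 0:
--         return 0
--     sa, sb = str(a), str(b)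
--     return sum(min(sa.count(c), sb.count(c)) for c in set(sa))
-- ===== Notes on version B (the rewrite author's own statement) =====
-- stated objective: simpler
-- what changed: Hoists the loop-invariant `a % 10 and b % 10` gate into one early return and replaces A's count-and-remove loop over mutable b_lst by a direct multiset-intersection sum of per-character min counts over the distinct characters of str(a).
import Mathlib
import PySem

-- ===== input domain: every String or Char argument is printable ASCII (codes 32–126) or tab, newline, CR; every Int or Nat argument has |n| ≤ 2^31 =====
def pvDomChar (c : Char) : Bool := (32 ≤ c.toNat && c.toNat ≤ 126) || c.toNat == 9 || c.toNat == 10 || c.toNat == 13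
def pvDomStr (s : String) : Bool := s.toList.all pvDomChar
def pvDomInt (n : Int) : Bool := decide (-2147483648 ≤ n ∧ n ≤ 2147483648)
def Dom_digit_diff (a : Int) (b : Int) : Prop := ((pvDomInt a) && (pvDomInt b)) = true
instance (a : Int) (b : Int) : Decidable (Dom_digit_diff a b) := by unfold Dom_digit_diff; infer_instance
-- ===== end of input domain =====

-- B hoists the loop-invariant `a % 10 and b % 10` gate and replaces A's
-- count-and-remove loop by a multiset-intersection sum (objective: simpler).

-- ===== PORT A =====
-- the state is (b_lst, count); `b_lst.remove(i)` runs only under the `i in b_lst`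
-- guard, where it equals List.erase (PySem.List.remove?_eq_some_erase)
def digit_diff (a : Int) (b : Int) : Int :=
  ((PySem.Int.toChars a).foldl (fun (st : List Char × Int) i =>
      if i ∈ st.1 ∧ PySem.Int.mod a 10 ≠ 0 ∧ PySem.Int.mod b 10 ≠ 0 then
        (st.1.erase i, st.2 + 1)
      else st) (PySem.Int.toChars b, 0)).2

-- ===== PORT B =====
-- `sa.count(c)` with a single-character c equals the character count;
-- `sum` over `set(sa)` is order-independent, ported over PySem.Set.ofList
def digit_diff_alt (a : Int) (b : Int) : Int :=
  if PySem.Int.mod a 10 = 0 ∨ PySem.Int.mod b 10 = 0 then 0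
  else
    ((PySem.Set.ofList (PySem.Int.toChars a)).map (fun c =>
      ((min ((PySem.Int.toChars a).count c) ((PySem.Int.toChars b).count c) : Nat) : Int))).sum

-- ===== PRECONDITION & SPEC =====
def Spec_digit_diff (a : Int) (b : Int) (out : Int) : Prop := out = digit_diff_alt a b
instance (a : Int) (b : Int) (out : Int) : Decidable (Spec_digit_diff a b out) := by unfold Spec_digit_diff; infer_instance

-- ===== CLAIM (what is proved, stated in full; the proofs are below) =====
def Claim_equal_digit_diff : Prop := ∀ (a : Int) (b : Int), Dom_digit_diff a b → Spec_digit_diff a b (digit_diff a b)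

-- ===== LEMMAS AND PROOFS =====

-- when the gate fails, A's loop never changes the state
theorem pv_fold_gate_false (a b : Int)
    (h : ¬ (PySem.Int.mod a 10 ≠ 0 ∧ PySem.Int.mod b 10 ≠ 0))
    (xs : List Char) (st : List Char × Int) :
    xs.foldl (fun (st : List Char × Int) i =>
      if i ∈ st.1 ∧ PySem.Int.mod a 10 ≠ 0 ∧ PySem.Int.mod b 10 ≠ 0 then
        (st.1.erase i, st.2 + 1)
      else st) st = st := by
  induction xs generalizing st with
  | nil => rfl
  | cons x xs ih =>
      simp only [List.foldl_cons]
      rw [if_neg (by tauto), ih]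

-- when the gate holds, A's loop computes the multiset-intersection cardinality
theorem pv_fold_gate_true (a b : Int)
    (ha : PySem.Int.mod a 10 ≠ 0) (hb : PySem.Int.mod b 10 ≠ 0)
    (xs : List Char) : ∀ (ys : List Char) (n : Int),
    (xs.foldl (fun (st : List Char × Int) i =>
      if i ∈ st.1 ∧ PySem.Int.mod a 10 ≠ 0 ∧ PySem.Int.mod b 10 ≠ 0 then
        (st.1.erase i, st.2 + 1)
      else st) (ys, n)).2
    = n + (((xs : Multiset Char) ∩ (ys : Multiset Char)).card : Int) := by
  induction xs with
  | nil => simp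
  | cons x xs ih =>
      intro ys n
      simp only [List.foldl_cons]
      by_cases hx : x ∈ ys
      · rw [if_pos ⟨hx, ha, hb⟩, ih]
        rw [show ((x :: xs : List Char) : Multiset Char) = x ::ₘ (xs : Multiset Char) from rfl,
            Multiset.cons_inter_of_pos _ hx]
        push_cast [Multiset.card_cons]
        rw [show ((ys.erase x : List Char) : Multiset Char) = (ys : Multiset Char).erase x from
              (Multiset.coe_erase ..)]
        ring
      · rw [if_neg (by tauto), ih]
        rw [show ((x :: xs : List Char) : Multiset Char) = x ::ₘ (xs : Multiset Char) from rfl,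
            Multiset.cons_inter_of_neg _ hx]

-- the multiset-intersection cardinality as a sum of min-counts over the support of s
theorem pv_card_inter (s t : Multiset Char) :
    (s ∩ t).card = ∑ c ∈ s.toFinset, min (s.count c) (t.count c) := by
  have hsub : (s ∩ t).toFinset ⊆ s.toFinset := by
    intro c hc
    simp only [Multiset.mem_toFinset] at hc ⊢
    exact Multiset.mem_of_le Multiset.inter_le_left hc
  have hzero : ∀ c ∈ s.toFinset, c ∉ (s ∩ t).toFinset → (s ∩ t).count c = 0 := by
    intro c _ hc
    rw [Multiset.count_eq_zero]
    exact fun hmem => hc (Multiset.mem_toFinset.mpr hmem)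
  rw [← Multiset.toFinset_sum_count_eq (s ∩ t), Finset.sum_subset hsub hzero]
  exact Finset.sum_congr rfl fun c _ => Multiset.count_inter ..

-- B's sum over the deduplicated characters equals the same cardinality
theorem pv_b_sum (xs ys : List Char) :
    ((PySem.Set.ofList xs).map (fun c => ((min (xs.count c) (ys.count c) : Nat) : Int))).sum
    = (((xs : Multiset Char) ∩ (ys : Multiset Char)).card : Int) := by
  have hfin : (PySem.Set.ofList xs).toFinset = xs.toFinset := by
    apply Finset.ext
    intro c
    simp [List.mem_toFinset, PySem.Set.mem_ofList]
  rw [← List.sum_toFinset _ (PySem.Set.nodup_ofList (xs := xs)), hfin, pv_card_inter]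
  push_cast
  apply Finset.sum_congr rfl
  intro c _
  simp

-- ===== VERDICT (by name: the statement is the Claim_ definition above) =====
theorem digit_diff_spec : Claim_equal_digit_diff := by
  intro a b _
  unfold Spec_digit_diff digit_diff digit_diff_alt
  by_cases h : PySem.Int.mod a 10 = 0 ∨ PySem.Int.mod b 10 = 0
  · rw [if_pos h, pv_fold_gate_false a b (by tauto)]
  · rw [not_or] at h
    rw [if_neg (by tauto), pv_fold_gate_true a b h.1 h.2, pv_b_sum]
    ring
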